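-- pv_equiv track=rewrite | github.com/percylechat/rsb | ex06.py | rewriteFormula
-- ===== SOURCE A (Python) =====
-- def rewriteFormula(str_):
--     stack = []
--     for elem in str_:
--         if elem.isalpha():
--             stack.append(elem)
--         elif elem == "!":
--             op1 = stack.pop()
--             stack.append(op1 + "!")
--         elif elem == "^":
--             # XOR(a, b) = (a AND NOT b) OR (NOT a AND b)
--             # AB|A!B!|& ((A OR B) OR NOT A) AND NOT B
--             op2 = stack.pop()
--             op1 = stack.pop()
--             stack.append(op1 + op2 + "|" + op1 + "!" + op2 + "!|&")
--         elif elem == ">":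
--             # (A ⇒ B) ⇔ (¬A ∨ B)
--             op2 = stack.pop()
--             op1 = stack.pop()
--             stack.append(op1 + "!" + op2 + "|")
--         elif elem == "=":
--             # (A ⇔ B) ⇔ ((A ⇒ B) ∧ (B ⇒ A))
--             # ((A ⇒ B) ∧ (B ⇒ A)) = ((¬A ∨ B) ∧ (¬B ∨ A))
--             # B!A|BA!|& (NOT B OR A) OR B)AND NOT A)
--             op2 = stack.pop()
--             op1 = stack.pop()
--             stack.append(op1 + "!" + op2 + "|" + op1 + op2 + "!|&")
--         else:
--             op2 = stack.pop()
--             op1 = stack.pop()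
--             stack.append(op1 + op2 + elem)
--     return stack[0]
-- ===== SOURCE B (Python) =====
-- # B: parse the RPN stream into an expression tree, then render forest[0] recursively.
-- def rewriteFormula(str_):
--     forest = []
--     for elem in str_:
--         if elem.isalpha():
--             forest.append(("leaf", elem))
--         elif elem == "!":
--             forest.append(("not", forest.pop()))
--         else:
--             r = forest.pop()
--             l = forest.pop()
--             forest.append((elem, l, r))
--     return _render(forest[0])
--
-- def _render(node):
--     if node[0] == "leaf":
--         return node[1]
--     if node[0] == "not":
--         return _render(node[1]) + "!"
--     op, l, r = node
--     cl, cr = _render(l), _render(r)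
--     if op == "^":
--         return cl + cr + "|" + cl + "!" + cr + "!|&"
--     if op == ">":
--         return cl + "!" + cr + "|"
--     if op == "=":
--         return cl + "!" + cr + "|" + cl + cr + "!|&"
--     return cl + cr + op
-- ===== Notes on version B (the rewrite author's own statement) =====
-- stated objective: alternative
-- what changed: B parses the RPN stream into an explicit expression tree (stack of nodes) and only afterwards renders the first tree of the forest recursively, instead of A's single pass that concatenates rewritten substrings on a string stack.
import Mathlib
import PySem

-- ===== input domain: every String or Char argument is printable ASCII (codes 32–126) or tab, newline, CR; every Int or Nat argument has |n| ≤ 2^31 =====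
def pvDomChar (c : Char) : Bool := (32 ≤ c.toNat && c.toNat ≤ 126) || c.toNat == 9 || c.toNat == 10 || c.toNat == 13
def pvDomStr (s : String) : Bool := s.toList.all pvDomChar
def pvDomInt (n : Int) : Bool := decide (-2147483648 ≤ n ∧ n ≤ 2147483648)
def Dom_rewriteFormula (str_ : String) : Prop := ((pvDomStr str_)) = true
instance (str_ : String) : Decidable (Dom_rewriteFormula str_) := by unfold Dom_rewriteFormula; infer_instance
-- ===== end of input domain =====

-- B builds an expression tree first and renders it afterwards, instead of A's string-stack rewriting pass; same cost, different decomposition.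

-- ===== PORT A =====
-- one loop step of A: the Python stack with its TOP at the list head (append/pop act on the head).
-- Where Python's stack.pop() raises IndexError (stack too short), this step returns [] — those
-- inputs are exactly the ones excluded by Pre_rewriteFormula below.
def pvStepA (st : List String) (c : Char) : List String :=
  if PySem.Chars.isalpha c then String.mk [c] :: st
  else if c = '!' then
    match st with
    | op1 :: r => (op1 ++ "!") :: r
    | [] => []
  else if c = '^' then
    match st with
    | op2 :: op1 :: r => (op1 ++ op2 ++ "|" ++ op1 ++ "!" ++ op2 ++ "!|&") :: r
    | _ => []
  else if c = '>' then
    match st with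
    | op2 :: op1 :: r => (op1 ++ "!" ++ op2 ++ "|") :: r
    | _ => []
  else if c = '=' then
    match st with
    | op2 :: op1 :: r => (op1 ++ "!" ++ op2 ++ "|" ++ op1 ++ op2 ++ "!|&") :: r
    | _ => []
  else
    match st with
    | op2 :: op1 :: r => (op1 ++ op2 ++ String.mk [c]) :: r
    | _ => []

def rewriteFormula (str_ : String) : String :=
  -- stack[0] (first appended element) is the LAST element of the head-is-top list
  match (str_.toList.foldl pvStepA []).getLast? with
  | some s => s
  | none => ""   -- Python raises IndexError on stack[0] here; excluded by Pre_rewriteFormula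

-- ===== PORT B =====
inductive PVTree : Type
  | leaf : Char → PVTree
  | not1 : PVTree → PVTree
  | bin : Char → PVTree → PVTree → PVTree

-- one loop step of B: a forest of trees, top at the head; [] on underflow (Python pop raises there)
def pvStepB (st : List PVTree) (c : Char) : List PVTree :=
  if PySem.Chars.isalpha c then PVTree.leaf c :: st
  else if c = '!' then
    match st with
    | t :: r => PVTree.not1 t :: r
    | [] => []
  else
    match st with
    | t2 :: t1 :: r => PVTree.bin c t1 t2 :: r
    | _ => []

def pvRender : PVTree → String
  | PVTree.leaf c => String.mk [c]
  | PVTree.not1 t => pvRender t ++ "!"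
  | PVTree.bin op l r =>
    let cl := pvRender l
    let cr := pvRender r
    if op = '^' then cl ++ cr ++ "|" ++ cl ++ "!" ++ cr ++ "!|&"
    else if op = '>' then cl ++ "!" ++ cr ++ "|"
    else if op = '=' then cl ++ "!" ++ cr ++ "|" ++ cl ++ cr ++ "!|&"
    else cl ++ cr ++ String.mk [op]

def rewriteFormula_alt (str_ : String) : String :=
  match (str_.toList.foldl pvStepB []).getLast? with
  | some t => pvRender t
  | none => ""   -- Python raises IndexError on forest[0] here; excluded by Pre_rewriteFormula

-- ===== PRECONDITION & SPEC =====
-- prefix letter-count and binary-operator-count (every non-letter char other than '!' pops two)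
def pvAlphaCnt (l : List Char) : Int := ((l.filter (fun c => PySem.Chars.isalpha c)).length : Int)
def pvBinCnt (l : List Char) : Int :=
  ((l.filter (fun c => !(PySem.Chars.isalpha c) && !(c == '!'))).length : Int)

-- Pre_ = exactly the inputs on which Python A returns (no stack underflow, final stack nonempty)
def Pre_rewriteFormula (str_ : String) : Prop :=
  (∀ i, i < str_.toList.length →
    (let p := str_.toList.take i
     let c := str_.toList.getD i ' '
     if PySem.Chars.isalpha c then True
     else if c = '!' then pvAlphaCnt p - pvBinCnt p ≥ 1
     else pvAlphaCnt p - pvBinCnt p ≥ 2)) ∧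
  pvAlphaCnt str_.toList - pvBinCnt str_.toList ≥ 1
instance (str_ : String) : Decidable (Pre_rewriteFormula str_) := by
  unfold Pre_rewriteFormula; infer_instance

def pvWitness_rewriteFormula : String := "AB^c&"

def Spec_rewriteFormula (str_ : String) (out : String) : Prop := out = rewriteFormula_alt str_
instance (str_ : String) (out : String) : Decidable (Spec_rewriteFormula str_ out) := by unfold Spec_rewriteFormula; infer_instance

-- ===== CLAIM (what is proved, stated in full; the proofs are below) =====
def Claim_equal_rewriteFormula : Prop := ∀ (str_ : String), Dom_rewriteFormula str_ → Pre_rewriteFormula str_ → Spec_rewriteFormula str_ (rewriteFormula str_)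

-- ===== LEMMAS AND PROOFS =====

-- one step of A on the rendered stack is the rendering of one step of B
lemma pvStep_comm (st : List PVTree) (c : Char) :
    pvStepA (st.map pvRender) c = (pvStepB st c).map pvRender := by
  unfold pvStepA pvStepB
  split_ifs with h1 h2 h3 h4 h5 <;>
    cases st with
    | nil => simp [pvRender]
    | cons t r =>
      cases r <;> simp_all [pvRender]

lemma pvFoldl_comm (l : List Char) (st : List PVTree) :
    l.foldl pvStepA (st.map pvRender) = (l.foldl pvStepB st).map pvRender := by
  induction l generalizing st with
  | nil => rfl
  | cons c l ih =>
    simp only [List.foldl_cons, pvStep_comm]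
    exact ih _

-- ===== VERDICT (by name: the statement is the Claim_ definition above) =====
theorem rewriteFormula_spec : Claim_equal_rewriteFormula := by
  intro str_ _ _
  unfold Spec_rewriteFormula rewriteFormula rewriteFormula_alt
  have h := pvFoldl_comm str_.toList []
  simp only [List.map_nil] at h
  rw [h, List.getLast?_map]
  cases (str_.toList.foldl pvStepB []).getLast? <;> rfl
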